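-- pv_equiv track=rewrite | github.com/AnirudhKosaraju/Algorithms-JeffErickson | Chapter 2 - Backtracking/Exercises/Exercise 1/MaxWeightSubsetSum.py | solve
-- ===== SOURCE A (Python) =====
-- def solve(X, W, T, index, weight):
--     if T == 0:
--         return weight
--     elif T < 0 or index == -1:
--         return -1
--     else:
--         a = solve(X, W, T, index-1, weight)
--         b = solve(X, W, T-X[index], index-1, weight+W[index])
--         return max(a,b)
-- ===== SOURCE B (Python) =====
-- def solve(X, W, T, index, weight):
--     # Memoized DP over (remaining target, index): computes the best extra weight
--     # (or None if no subset works) once per state, then clamps with -1 at the end.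
--     if T == 0:
--         return weight
--     memo = {}
--
--     def best(t, i):
--         if t < 0 or i == -1:
--             return None
--         if (t, i) in memo:
--             return memo[(t, i)]
--         res = best(t, i - 1)
--         t2 = t - X[i]
--         if t2 == 0:
--             take = W[i]
--         else:
--             sub = best(t2, i - 1)
--             take = None if sub is None else sub + W[i]
--         if take is not None and (res is None or take > res):
--             res = take
--         memo[(t, i)] = res
--         return res
--
--     m = best(T, index)
--     return -1 if m is None else max(-1, weight + m)
-- ===== Notes on version B (the rewrite author's own statement) =====
-- stated objective: faster
-- what changed: Replaces A's exponential recursion that threads the accumulated weight and -1 sentinel through every call with a memoized DP over (remaining target, index) computing the optional best extra weight once per state, clamped with -1 once at the end.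
import Mathlib
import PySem

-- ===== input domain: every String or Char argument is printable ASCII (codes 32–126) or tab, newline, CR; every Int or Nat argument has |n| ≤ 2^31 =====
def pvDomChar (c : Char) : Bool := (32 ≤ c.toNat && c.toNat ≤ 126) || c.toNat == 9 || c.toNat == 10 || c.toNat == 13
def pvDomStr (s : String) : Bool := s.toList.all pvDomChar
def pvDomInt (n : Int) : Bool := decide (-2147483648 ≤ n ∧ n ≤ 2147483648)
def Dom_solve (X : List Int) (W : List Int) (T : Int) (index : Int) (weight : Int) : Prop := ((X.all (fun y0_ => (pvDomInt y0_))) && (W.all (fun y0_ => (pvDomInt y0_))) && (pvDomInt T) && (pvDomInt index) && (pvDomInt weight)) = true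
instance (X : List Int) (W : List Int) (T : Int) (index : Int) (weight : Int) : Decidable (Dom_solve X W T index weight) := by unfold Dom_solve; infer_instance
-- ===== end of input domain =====

-- B replaces A's exponential weight-threading recursion with a memoized DP over
-- (remaining target, index) and a single -1 clamp at the end (objective: faster).

-- ===== PORT A =====
-- Literal transliteration of A's recursion; the 'index < -1' branch is a totality
-- guard only (Python recurses forever / raises there; such inputs are outside Pre_).
def solve (X : List Int) (W : List Int) (T : Int) (index : Int) (weight : Int) : Int :=
  if T = 0 then weight
  else if T < 0 ∨ index = -1 then -1
  else if _h : index < -1 then -1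
  else
    let a := solve X W T (index - 1) weight
    let b := solve X W (T - (PySem.List.pyGet? X index).getD 0) (index - 1)
               (weight + (PySem.List.pyGet? W index).getD 0)
    max a b
termination_by (index + 1).toNat
decreasing_by all_goals omega

-- ===== PORT B =====
-- the memo dict threaded through B's recursion (memo[(t,i)] : Option Int = best
-- extra weight achievable from state (remaining t, index i), None = impossible)
def solveAltBest (X : List Int) (W : List Int) : Int → Int → PySem.Dict (Int × Int) (Option Int) → Option Int × PySem.Dict (Int × Int) (Option Int) :=
  fun t i memo =>
    if t < 0 ∨ i = -1 then (none, memo)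
    else if _h : i < -1 then (none, memo)  -- totality guard; unreachable inside Pre_
    else
      match memo.get? (t, i) with
      | some v => (v, memo)
      | none =>
        let p := solveAltBest X W t (i - 1) memo
        let res := p.1
        let t2 := t - (PySem.List.pyGet? X i).getD 0
        let q :=
          if t2 = 0 then (some ((PySem.List.pyGet? W i).getD 0), p.2)
          else
            let s := solveAltBest X W t2 (i - 1) p.2
            (s.1.map (· + (PySem.List.pyGet? W i).getD 0), s.2)
        let res2 :=
          match q.1, res with
          | none, _ => res
          | some tv, none => some tv
          | some tv, some rv => if tv > rv then some tv else some rv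
        (res2, q.2.insert (t, i) res2)
termination_by t i _ => (i + 1).toNat
decreasing_by all_goals omega

def solve_alt (X : List Int) (W : List Int) (T : Int) (index : Int) (weight : Int) : Int :=
  if T = 0 then weight
  else
    match (solveAltBest X W T index PySem.Dict.empty).1 with
    | none => -1
    | some m => max (-1) (weight + m)

-- ===== PRECONDITION & SPEC =====
-- Pre_: exactly the inputs on which the Python A returns (elsewhere it raises an
-- IndexError or RecursionError): with T ≠ 0 and T ≥ 0 the recursion touches
-- X[i], W[i] for 0 ≤ i ≤ index, so index must lie in [-1, min(|X|, |W|)).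
def Pre_solve (X : List Int) (W : List Int) (T : Int) (index : Int) (weight : Int) : Prop :=
  T = 0 ∨ T < 0 ∨ (-1 ≤ index ∧ index < X.length ∧ index < W.length)
instance (X : List Int) (W : List Int) (T : Int) (index : Int) (weight : Int) : Decidable (Pre_solve X W T index weight) := by unfold Pre_solve; infer_instance
def pvWitness_solve : List Int × List Int × Int × Int × Int := ([2, 3, 5], [1, 4, 2], 5, 2, 0)

def Spec_solve (X : List Int) (W : List Int) (T : Int) (index : Int) (weight : Int) (out : Int) : Prop := out = solve_alt X W T index weight
instance (X : List Int) (W : List Int) (T : Int) (index : Int) (weight : Int) (out : Int) : Decidable (Spec_solve X W T index weight out) := by unfold Spec_solve; infer_instance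

-- ===== CLAIM (what is proved, stated in full; the proofs are below) =====
def Claim_equal_solve : Prop := ∀ (X : List Int) (W : List Int) (T : Int) (index : Int) (weight : Int), Dom_solve X W T index weight → Pre_solve X W T index weight → Spec_solve X W T index weight (solve X W T index weight)

-- ===== LEMMAS AND PROOFS =====

-- Pure (memo-free) specification of B's `best`.
def bestSpec (X : List Int) (W : List Int) : Int → Int → Option Int :=
  fun t i =>
    if t < 0 ∨ i = -1 then none
    else if _h : i < -1 then none
    else
      let res := bestSpec X W t (i - 1)
      let t2 := t - (PySem.List.pyGet? X i).getD 0
      let take :=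
        if t2 = 0 then some ((PySem.List.pyGet? W i).getD 0)
        else (bestSpec X W t2 (i - 1)).map (· + (PySem.List.pyGet? W i).getD 0)
      match take, res with
      | none, _ => res
      | some tv, none => some tv
      | some tv, some rv => if tv > rv then some tv else some rv
termination_by t i => (i + 1).toNat
decreasing_by all_goals omega

theorem bestSpec_step (X : List Int) (W : List Int) (t i : Int)
    (h1 : ¬(t < 0 ∨ i = -1)) (h2 : ¬ i < -1) :
    bestSpec X W t i =
      (match
        (if t - (PySem.List.pyGet? X i).getD 0 = 0 then some ((PySem.List.pyGet? W i).getD 0)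
         else (bestSpec X W (t - (PySem.List.pyGet? X i).getD 0) (i - 1)).map
                (· + (PySem.List.pyGet? W i).getD 0)),
        bestSpec X W t (i - 1) with
       | none, _ => bestSpec X W t (i - 1)
       | some tv, none => some tv
       | some tv, some rv => if tv > rv then some tv else some rv) := by
  conv_lhs => rw [bestSpec]
  simp only [h1, h2, ite_false, dite_false]

theorem solve_step (X : List Int) (W : List Int) (t i w : Int)
    (ht0 : ¬ t = 0) (h1 : ¬(t < 0 ∨ i = -1)) (h2 : ¬ i < -1) :
    solve X W t i w =
      max (solve X W t (i - 1) w)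
        (solve X W (t - (PySem.List.pyGet? X i).getD 0) (i - 1)
          (w + (PySem.List.pyGet? W i).getD 0)) := by
  conv_lhs => rw [solve]
  simp only [ht0, h1, h2, ite_false, dite_false]

-- the memo invariant: every stored entry equals the pure spec at its key
def MemoInv (X : List Int) (W : List Int) (memo : PySem.Dict (Int × Int) (Option Int)) : Prop :=
  ∀ t i v, memo.get? (t, i) = some v → v = bestSpec X W t i

theorem solveAltBest_correct (X : List Int) (W : List Int) :
    ∀ n (t i : Int) memo, (i + 1).toNat ≤ n → MemoInv X W memo →
      (solveAltBest X W t i memo).1 = bestSpec X W t i ∧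
      MemoInv X W (solveAltBest X W t i memo).2 := by
  intro n
  induction n with
  | zero =>
    intro t i memo hn hInv
    have hi : i ≤ -1 := by omega
    rw [solveAltBest, bestSpec]
    by_cases h1 : t < 0 ∨ i = -1
    · simp [h1, hInv]
    · have h2 : i < -1 := by omega
      simp [h1, h2, hInv]
  | succ n ih =>
    intro t i memo hn hInv
    by_cases h1 : t < 0 ∨ i = -1
    · rw [solveAltBest, bestSpec]; simp [h1, hInv]
    · by_cases h2 : i < -1
      · rw [solveAltBest, bestSpec]; simp [h1, h2, hInv]
      · rw [solveAltBest]
        simp only [h1, h2, ite_false, dite_false]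
        cases hm : memo.get? (t, i) with
        | some v =>
          exact ⟨hInv t i v hm, hInv⟩
        | none =>
          obtain ⟨hp1, hp2⟩ := ih t (i - 1) memo (by omega) hInv
          by_cases ht2 : t - (PySem.List.pyGet? X i).getD 0 = 0
          · clear ih hn hInv hm
            simp only [ht2, ite_true, hp1]
            rw [bestSpec_step X W t i h1 h2]
            simp only [ht2, ite_true]
            refine ⟨by first | rfl | trivial, ?_⟩
            intro t' i' v hv
            rw [PySem.Dict.get?_insert] at hv
            split at hv
            · rename_i heq
              cases hv
              have ht' : t' = t := congrArg Prod.fst heq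
              have hi' : i' = i := congrArg Prod.snd heq
              rw [ht', hi', bestSpec_step X W t i h1 h2]
              simp only [ht2, ite_true]
            · exact hp2 t' i' v hv
          · obtain ⟨hs1, hs2⟩ := ih (t - (PySem.List.pyGet? X i).getD 0) (i - 1)
              (solveAltBest X W t (i - 1) memo).2 (by omega) hp2
            clear ih hn hInv hm
            simp only [ht2, ite_false, hp1, hs1]
            rw [bestSpec_step X W t i h1 h2]
            simp only [ht2, ite_false]
            refine ⟨by first | rfl | trivial, ?_⟩
            intro t' i' v hv
            rw [PySem.Dict.get?_insert] at hv
            split at hv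
            · rename_i heq
              cases hv
              have ht' : t' = t := congrArg Prod.fst heq
              have hi' : i' = i := congrArg Prod.snd heq
              rw [ht', hi', bestSpec_step X W t i h1 h2]
              simp only [ht2, ite_false]
            · exact hs2 t' i' v hv

theorem solve_eq_clamp (X : List Int) (W : List Int) :
    ∀ n (t i w : Int), (i + 1).toNat ≤ n →
      solve X W t i w =
        (if t = 0 then w else
          match bestSpec X W t i with
          | none => -1
          | some m => max (-1) (w + m)) := by
  intro n
  induction n with
  | zero =>
    intro t i w hn
    rw [solve, bestSpec]
    by_cases ht0 : t = 0
    · simp [ht0]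
    · by_cases h1 : t < 0 ∨ i = -1
      · simp [ht0, h1]
      · have h2 : i < -1 := by omega
        simp [ht0, h1, h2]
  | succ n ih =>
    intro t i w hn
    by_cases ht0 : t = 0
    · rw [solve]; simp [ht0]
    · by_cases h1 : t < 0 ∨ i = -1
      · rw [solve, bestSpec]; simp [ht0, h1]
      · by_cases h2 : i < -1
        · rw [solve, bestSpec]; simp [ht0, h1, h2]
        · have ha := ih t (i - 1) w (by omega)
          have hb := ih (t - (PySem.List.pyGet? X i).getD 0) (i - 1)
            (w + (PySem.List.pyGet? W i).getD 0) (by omega)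
          rw [solve_step X W t i w ht0 h1 h2, ha, hb,
            bestSpec_step X W t i h1 h2]
          clear ih hn ha hb
          simp only [ht0, ite_false]
          by_cases ht2 : t - (PySem.List.pyGet? X i).getD 0 = 0
          · simp only [ht2, ite_true]
            cases hr : bestSpec X W t (i - 1) with
            | none => ((try simp) <;> omega)
            | some rv => ((try simp) <;> split_ifs at * <;> (try simp_all) <;> omega)
          · simp only [ht2, ite_false]
            cases hr : bestSpec X W t (i - 1) with
            | none =>
              cases hs : bestSpec X W (t - (PySem.List.pyGet? X i).getD 0) (i - 1) with
              | none => simp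
              | some sv => ((try simp) <;> omega)
            | some rv =>
              cases hs : bestSpec X W (t - (PySem.List.pyGet? X i).getD 0) (i - 1) with
              | none => ((try simp) <;> omega)
              | some sv => ((try simp) <;> split_ifs at * <;> (try simp_all) <;> omega)

-- ===== VERDICT (by name: the statement is the Claim_ definition above) =====
theorem solve_spec : Claim_equal_solve := by
  intro X W T index weight _hD _hP
  unfold Spec_solve solve_alt
  have h1 := solve_eq_clamp X W ((index + 1).toNat) T index weight le_rfl
  have h2 := (solveAltBest_correct X W ((index + 1).toNat) T index PySem.Dict.empty le_rfl
    (by intro t i v h; simp [PySem.Dict.get?_empty] at h)).1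
  rw [h1, h2]
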